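-- pv_equiv track=rewrite | github.com/avalonche/scrapy-canvas | src/scheduler.py | __check_valid_days
-- ===== SOURCE A (Python) =====
-- def __check_valid_days(options, comb):
--     count = 0
--     check = []
--     for i in range(len(comb)):
--         for code, times in options.items():
--             if comb[i] in times.keys():
--                 check.append(code)
--     check = set(check)
--     if len(check) == len(options):
--         return True
--     return False
-- ===== SOURCE B (Python) =====
-- def __check_valid_days(options, comb):
--     # Reversed nesting + short-circuit: every option code must have some comb value among its times.
--     return all(any(t in times for t in comb) for times in options.values())
-- ===== Notes on version B (the rewrite author's own statement) =====
-- stated objective: simpler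
-- what changed: Replaced A's collect-matched-codes-into-a-list / set-dedup / length-comparison scheme with reversed loop nesting and short-circuiting: B checks directly that every option code has some comb value among its times via all/any, maintaining no list or set.
import Mathlib
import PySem

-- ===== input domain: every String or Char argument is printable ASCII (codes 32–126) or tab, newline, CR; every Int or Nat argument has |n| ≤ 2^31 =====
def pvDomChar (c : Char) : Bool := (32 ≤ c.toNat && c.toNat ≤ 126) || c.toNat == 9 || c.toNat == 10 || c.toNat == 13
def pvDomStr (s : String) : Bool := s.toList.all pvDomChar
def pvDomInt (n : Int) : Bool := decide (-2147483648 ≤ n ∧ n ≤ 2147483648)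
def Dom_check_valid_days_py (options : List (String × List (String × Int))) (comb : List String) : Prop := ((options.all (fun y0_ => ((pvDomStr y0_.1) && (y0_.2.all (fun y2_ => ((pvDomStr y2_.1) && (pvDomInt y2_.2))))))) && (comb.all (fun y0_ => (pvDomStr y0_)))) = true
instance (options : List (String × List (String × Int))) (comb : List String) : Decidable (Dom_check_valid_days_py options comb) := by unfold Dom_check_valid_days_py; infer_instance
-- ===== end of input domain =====

-- B replaces A's collect-codes / set-dedup / length-comparison by reversed loop nesting with all/any
-- short-circuiting over the option codes (objective: simpler).


-- ===== PORT A =====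
def check_valid_days_py (options : List (String × List (String × Int))) (comb : List String) : Bool :=
  let check : List String :=
    (PySem.List.pyRange 0 (comb.length : Int) 1).foldl
      (fun check i =>
        options.foldl
          (fun check ct =>
            match PySem.List.pyGet? comb i with   -- comb[i]; always in range since i ∈ range(len(comb))
            | some t => if (PySem.Dict.mk ct.2).keys.contains t then check ++ [ct.1] else check
            | none => check)
          check)
      []
  let checkS : PySem.Set String := PySem.Set.ofList check
  if checkS.length = options.length then true else false

-- ===== PORT B =====
def check_valid_days_py_alt (options : List (String × List (String × Int))) (comb : List String) : Bool :=
  options.all (fun ct => comb.any (fun t => (PySem.Dict.mk ct.2).contains t))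

-- ===== PRECONDITION & SPEC =====
-- Pre_ requires distinct option codes: 'options' is a Python dict, whose keys are necessarily
-- distinct, so a duplicate-key association list represents no Python input at all.
def Pre_check_valid_days_py (options : List (String × List (String × Int))) (comb : List String) : Prop :=
  (options.map Prod.fst).Nodup
instance (options : List (String × List (String × Int))) (comb : List String) : Decidable (Pre_check_valid_days_py options comb) := by unfold Pre_check_valid_days_py; infer_instance
def pvWitness_check_valid_days_py : (List (String × List (String × Int))) × List String :=
  ([("code", [("mon", 1)]), ("other", [("tue", 2)])], ["mon", "tue"])

def Spec_check_valid_days_py (options : List (String × List (String × Int))) (comb : List String) (out : Bool) : Prop := out = check_valid_days_py_alt options comb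
instance (options : List (String × List (String × Int))) (comb : List String) (out : Bool) : Decidable (Spec_check_valid_days_py options comb out) := by unfold Spec_check_valid_days_py; infer_instance

-- ===== CLAIM (what is proved, stated in full; the proofs are below) =====
def Claim_equal_check_valid_days_py : Prop := ∀ (options : List (String × List (String × Int))) (comb : List String), Dom_check_valid_days_py options comb → Pre_check_valid_days_py options comb → Spec_check_valid_days_py options comb (check_valid_days_py options comb)

-- ===== LEMMAS AND PROOFS =====

-- A's inner loop over options, for a fixed in-range index i with comb[i] = t, appends the codes matched by t.
theorem pv_inner_loop (options : List (String × List (String × Int))) (comb : List String)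
    (i : Int) (t : String) (h : PySem.List.pyGet? comb i = some t) (acc : List String) :
    options.foldl
      (fun check ct =>
        match PySem.List.pyGet? comb i with
        | some t => if (PySem.Dict.mk ct.2).keys.contains t then check ++ [ct.1] else check
        | none => check)
      acc
    = acc ++ (options.filter (fun ct => (PySem.Dict.mk ct.2).keys.contains t)).map Prod.fst := by
  simp only [h]
  exact PySem.List.foldl_append_if (p := fun ct => (PySem.Dict.mk ct.2).keys.contains t)
    (f := Prod.fst) options acc

-- A's check list is the concatenation, over the indices of comb, of the codes matched by comb[k].
theorem pv_check_eq (options : List (String × List (String × Int))) (comb : List String) :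
    ((PySem.List.pyRange 0 (comb.length : Int) 1).foldl
      (fun check i =>
        options.foldl
          (fun check ct =>
            match PySem.List.pyGet? comb i with
            | some t => if (PySem.Dict.mk ct.2).keys.contains t then check ++ [ct.1] else check
            | none => check)
          check)
      ([] : List String))
    = (List.range comb.length).flatMap
        (fun k => (options.filter (fun ct => (PySem.Dict.mk ct.2).keys.contains (comb.getD k ""))).map Prod.fst) := by
  rw [PySem.List.pyRange_zero_natCast comb.length, List.foldl_map]
  rw [List.foldl_ext (g := fun acc k =>
    acc ++ (options.filter (fun ct => (PySem.Dict.mk ct.2).keys.contains (comb.getD k ""))).map Prod.fst)]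
  · simpa using PySem.List.foldl_append_eq_flatMap
      (fun k => (options.filter (fun ct => (PySem.Dict.mk ct.2).keys.contains (comb.getD k ""))).map Prod.fst)
      (List.range comb.length) []
  · intro acc k hk
    have hklt : k < comb.length := List.mem_range.mp hk
    have hget : PySem.List.pyGet? comb (k : Int) = some comb[k] := by
      simp [hklt]
    rw [pv_inner_loop options comb _ _ hget, List.getD_eq_getElem comb "" hklt]

-- membership in A's check list ↔ some comb value matches that code's times
theorem pv_mem_check (options : List (String × List (String × Int))) (comb : List String) (c : String) :
    (c ∈ (List.range comb.length).flatMap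
        (fun k => (options.filter (fun ct => (PySem.Dict.mk ct.2).keys.contains (comb.getD k ""))).map Prod.fst))
    ↔ ∃ ct ∈ options, ct.1 = c ∧ ∃ t ∈ comb, t ∈ (PySem.Dict.mk ct.2).keys := by
  simp only [List.mem_flatMap, List.mem_range, List.mem_map, List.mem_filter]
  constructor
  · rintro ⟨k, hk, ct, ⟨hct, hmatch⟩, rfl⟩
    refine ⟨ct, hct, rfl, comb[k], List.getElem_mem hk, ?_⟩
    rw [List.getD_eq_getElem comb "" hk] at hmatch
    exact List.contains_iff_mem.mp hmatch
  · rintro ⟨ct, hct, rfl, t, htc, htk⟩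
    obtain ⟨k, hk, rfl⟩ := List.mem_iff_getElem.mp htc
    refine ⟨k, hk, ct, ⟨hct, ?_⟩, rfl⟩
    rw [List.getD_eq_getElem comb "" hk]
    exact List.contains_iff_mem.mpr htk

-- cardinality step: with distinct codes, |set(check)| = |options| ↔ every code is matched
theorem pv_len_iff (options : List (String × List (String × Int))) (check : List String)
    (Q : (String × List (String × Int)) → Prop)
    (hnd : (options.map Prod.fst).Nodup)
    (hmem : ∀ c, c ∈ check ↔ ∃ ct ∈ options, ct.1 = c ∧ Q ct) :
    ((PySem.Set.ofList check).length = options.length ↔ ∀ ct ∈ options, Q ct) := by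
  have hSnd : (PySem.Set.ofList check).Nodup := PySem.Set.nodup_ofList check
  have hSmem : ∀ c, c ∈ PySem.Set.ofList check ↔ ∃ ct ∈ options, ct.1 = c ∧ Q ct := by
    intro c; rw [PySem.Set.mem_ofList]; exact hmem c
  have hsub : PySem.Set.ofList check ⊆ options.map Prod.fst := by
    intro c hc
    obtain ⟨ct, hct, rfl, _⟩ := (hSmem c).mp hc
    exact List.mem_map_of_mem hct
  constructor
  · intro hlen ct hct
    have hsp : List.Subperm (PySem.Set.ofList check) (options.map Prod.fst) :=
      List.subperm_of_subset hSnd hsub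
    have hperm : (PySem.Set.ofList check).Perm (options.map Prod.fst) :=
      hsp.perm_of_length_le (by rw [List.length_map]; omega)
    have hin : ct.1 ∈ PySem.Set.ofList check :=
      hperm.mem_iff.mpr (List.mem_map_of_mem hct)
    obtain ⟨ct', hct', heq, hQ⟩ := (hSmem ct.1).mp hin
    exact List.inj_on_of_nodup_map hnd hct' hct heq ▸ hQ
  · intro hall
    have hperm : (PySem.Set.ofList check).Perm (options.map Prod.fst) := by
      rw [List.perm_ext_iff_of_nodup hSnd hnd]
      intro c
      constructor
      · exact fun hc => hsub hc
      · intro hc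
        obtain ⟨ct, hct, rfl⟩ := List.mem_map.mp hc
        exact (hSmem ct.1).mpr ⟨ct, hct, rfl, hall ct hct⟩
    rw [hperm.length_eq, List.length_map]

-- ===== VERDICT (by name: the statement is the Claim_ definition above) =====
theorem check_valid_days_py_spec : Claim_equal_check_valid_days_py := by
  intro options comb _ hpre
  unfold Spec_check_valid_days_py check_valid_days_py check_valid_days_py_alt
  rw [Bool.eq_iff_iff]
  simp only [pv_check_eq options comb]
  have hiff := pv_len_iff options _
    (fun ct => ∃ t ∈ comb, t ∈ (PySem.Dict.mk ct.2).keys) hpre (pv_mem_check options comb)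
  constructor
  · intro h
    split_ifs at h with hc
    · rw [List.all_eq_true]
      intro ct hct
      obtain ⟨t, htc, htk⟩ := hiff.mp hc ct hct
      rw [List.any_eq_true]
      exact ⟨t, htc, (PySem.Dict.contains_iff_mem_keys _ _).mpr htk⟩
  · intro h
    have hall : ∀ ct ∈ options, ∃ t ∈ comb, t ∈ (PySem.Dict.mk ct.2).keys := by
      intro ct hct
      obtain ⟨t, htc, htk⟩ := List.any_eq_true.mp (List.all_eq_true.mp h ct hct)
      exact ⟨t, htc, (PySem.Dict.contains_iff_mem_keys _ _).mp htk⟩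
    rw [if_pos (hiff.mpr hall)]
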